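-- pv_equiv track=rewrite | github.com/tishchennko/EGE | Homeworks/homework-14-02-25/task-15.18175.py | f
-- ===== SOURCE A (Python) =====
-- def f(A):
--     for x in range(1, 100):
--         x_7 = x % 7 == 0
--         x_13 = x % 13 == 0
--         f = ((not x_7) and x_13) <= (x > A - 40)
--         if f != 1:
--             return 0
--     return 1
-- ===== SOURCE B (Python) =====
-- def f(A):
--     # Loop is a universal check over 1..99: every x divisible by 13 but not 7
--     # must exceed A - 40; the smallest such x is 13, so that is the whole test.
--     return 1 if A - 40 < 13 else 0
-- ===== Notes on version B (the rewrite author's own statement) =====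
-- stated objective: simpler
-- what changed: The 99-iteration loop checking the implication for every x in 1..99 is replaced by the single comparison A - 40 < 13, since 13 is the smallest x in range divisible by 13 and not by 7.
import Mathlib
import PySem

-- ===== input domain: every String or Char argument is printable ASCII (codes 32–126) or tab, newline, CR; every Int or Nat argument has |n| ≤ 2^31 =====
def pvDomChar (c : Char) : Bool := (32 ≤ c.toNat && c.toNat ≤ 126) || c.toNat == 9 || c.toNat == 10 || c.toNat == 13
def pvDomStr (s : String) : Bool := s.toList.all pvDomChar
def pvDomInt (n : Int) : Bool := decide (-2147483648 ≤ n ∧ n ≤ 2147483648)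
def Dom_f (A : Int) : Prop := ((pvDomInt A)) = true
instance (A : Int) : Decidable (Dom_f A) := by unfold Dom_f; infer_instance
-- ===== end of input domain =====

-- B replaces the 1..99 loop by the single equivalent comparison A - 40 < 13 (simpler).

-- ===== PORT A =====
def fGo : List Int → Int → Int
  | [], _ => 1
  | x :: xs, A =>
    let x7 : Bool := PySem.Int.mod x 7 == 0
    let x13 : Bool := PySem.Int.mod x 13 == 0
    -- Python's 'bool <= bool' is implication: rendered as !p || q
    let fv : Bool := (!(!x7 && x13)) || decide (A - 40 < x)
    if fv = false then 0 else fGo xs A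

def f (A : Int) : Int := fGo (PySem.List.pyRange 1 100 1) A

-- ===== PORT B =====
def f_alt (A : Int) : Int := if A - 40 < 13 then 1 else 0

-- ===== PRECONDITION & SPEC =====
def Spec_f (A : Int) (out : Int) : Prop := out = f_alt A
instance (A : Int) (out : Int) : Decidable (Spec_f A out) := by unfold Spec_f; infer_instance

-- ===== CLAIM (what is proved, stated in full; the proofs are below) =====
def Claim_equal_f : Prop := ∀ (A : Int), Dom_f A → Spec_f A (f A)

-- ===== LEMMAS AND PROOFS =====

theorem fGo_eq (xs : List Int) (A : Int) :
    fGo xs A =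
      if ∀ x ∈ xs, (¬ 7 ∣ x ∧ 13 ∣ x) → A - 40 < x then 1 else 0 := by
  induction xs with
  | nil => simp [fGo]
  | cons x xs ih =>
    have hfv : ((!(!(PySem.Int.mod x 7 == 0) && (PySem.Int.mod x 13 == 0))) ||
        decide (A - 40 < x)) = false ↔ ¬ ((¬ 7 ∣ x ∧ 13 ∣ x) → A - 40 < x) := by
      simp
      tauto
    simp only [fGo, ih, List.forall_mem_cons]
    by_cases hx : (¬ (7:Int) ∣ x ∧ (13:Int) ∣ x) → A - 40 < x
    · rw [if_neg (fun h => hfv.mp h hx)]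
      exact if_congr ⟨fun h => ⟨hx, h⟩, And.right⟩ rfl rfl
    · rw [if_pos (hfv.mpr hx), if_neg (by tauto)]

theorem key (A : Int) :
    (∀ x ∈ PySem.List.pyRange 1 100 1, (¬ 7 ∣ x ∧ 13 ∣ x) → A - 40 < x) ↔ A - 40 < 13 := by
  constructor
  · intro h
    exact h 13 (by rw [PySem.List.mem_pyRange_one]; omega) ⟨by decide, dvd_refl 13⟩
  · intro hA x hx ⟨_, h13⟩
    rw [PySem.List.mem_pyRange_one] at hx
    have : (13 : Int) ≤ x := Int.le_of_dvd (by omega) h13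
    omega

-- ===== VERDICT (by name: the statement is the Claim_ definition above) =====
theorem f_spec : Claim_equal_f := by
  intro A _
  unfold Spec_f f f_alt
  rw [fGo_eq]
  by_cases h : A - 40 < 13
  · rw [if_pos ((key A).mpr h), if_pos h]
  · rw [if_neg (fun hc => h ((key A).mp hc)), if_neg h]
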